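-- pv_equiv track=rewrite | github.com/Wakgari-Eshetu/A2SV_Solved_Questions | check_value.py | lg
-- ===== SOURCE A (Python) =====
-- def lg(nums):
--     max_value = 0
--     for i in range(len(nums)):
--         count = 0
--         for j in range(i , len(nums)-1):
--             if nums[j+1] - nums[j] == 1:
--                 count += 1
--         max_value = max(max_value , count )
--     return max_value
-- ===== SOURCE B (Python) =====
-- def lg(nums):
--     total = 0
--     for a, b in zip(nums, nums[1:]):
--         if b - a == 1:
--             total += 1
--     return total
-- ===== Notes on version B (the rewrite author's own statement) =====
-- stated objective: faster
-- what changed: Replaced the quadratic loop that recounts +1-adjacent pairs for every start index and takes the max with a single linear pass over zip(nums, nums[1:]), since the count for start 0 already dominates all suffix counts.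
import Mathlib
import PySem

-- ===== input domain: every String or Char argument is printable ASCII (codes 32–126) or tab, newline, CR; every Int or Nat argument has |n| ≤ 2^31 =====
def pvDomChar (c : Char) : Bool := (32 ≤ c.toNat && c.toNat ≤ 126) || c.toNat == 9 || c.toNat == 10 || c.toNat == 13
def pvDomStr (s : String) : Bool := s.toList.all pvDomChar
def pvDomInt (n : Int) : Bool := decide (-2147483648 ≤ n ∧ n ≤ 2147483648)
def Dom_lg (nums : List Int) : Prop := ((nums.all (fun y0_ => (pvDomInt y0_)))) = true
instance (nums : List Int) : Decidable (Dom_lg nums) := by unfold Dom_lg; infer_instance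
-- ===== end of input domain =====

-- B replaces A's quadratic max-over-starts recount with one linear pass over adjacent pairs (the start-0 count dominates all suffix counts).


-- ===== PORT A =====
def lg (nums : List Int) : Int :=
  (PySem.List.pyRange 0 (nums.length : Int) 1).foldl
    (fun max_value i =>
      let count : Int :=
        (PySem.List.pyRange i ((nums.length : Int) - 1) 1).foldl
          (fun count j =>
            if PySem.List.pyGetD nums (j + 1) 0 - PySem.List.pyGetD nums j 0 = 1 then
              count + 1
            else count) 0
      max max_value count) 0

-- ===== PORT B =====
def lg_alt (nums : List Int) : Int :=
  (nums.zip (nums.drop 1)).foldl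
    (fun total p => if p.2 - p.1 = 1 then total + 1 else total) 0

-- ===== PRECONDITION & SPEC =====
def Spec_lg (nums : List Int) (out : Int) : Prop := out = lg_alt nums
instance (nums : List Int) (out : Int) : Decidable (Spec_lg nums out) := by unfold Spec_lg; infer_instance

-- ===== CLAIM (what is proved, stated in full; the proofs are below) =====
def Claim_equal_lg : Prop := ∀ (nums : List Int), Dom_lg nums → Spec_lg nums (lg nums)

-- ===== LEMMAS AND PROOFS =====

-- A's inner count starting at i, as a countP over the index range
def cnt (nums : List Int) (i : Int) : Int :=
  ((PySem.List.pyRange i ((nums.length : Int) - 1) 1).countP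
    (fun j => decide (PySem.List.pyGetD nums (j + 1) 0 - PySem.List.pyGetD nums j 0 = 1)) : Int)

lemma cnt_nonneg (nums : List Int) (i : Int) : 0 ≤ cnt nums i := by
  unfold cnt; exact Int.natCast_nonneg _

-- suffix counts are dominated by the count from start 0
lemma cnt_le_cnt_zero (nums : List Int) (i : Int) (hi : 0 ≤ i) :
    cnt nums i ≤ cnt nums 0 := by
  unfold cnt
  by_cases h : i ≤ (nums.length : Int) - 1
  · rw [PySem.List.pyRange_one_append 0 i ((nums.length : Int) - 1) hi h,
      List.countP_append]
    push_cast
    omega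
  · rw [PySem.List.pyRange_one_eq_nil (by omega)]
    simp

-- upper bound for a running max over a projection
lemma foldl_max_le (l : List Int) (f : Int → Int) (B init : Int)
    (h0 : init ≤ B) (h : ∀ x ∈ l, f x ≤ B) :
    l.foldl (fun acc x => max acc (f x)) init ≤ B := by
  induction l generalizing init with
  | nil => simpa using h0
  | cons a t ih =>
    simp only [List.foldl_cons]
    exact ih (max init (f a)) (by
      have := h a (by simp)
      omega) (fun x hx => h x (by simp [hx]))

-- A's inner fold is cnt
lemma inner_eq (nums : List Int) (i : Int) :
    (PySem.List.pyRange i ((nums.length : Int) - 1) 1).foldl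
      (fun count j =>
        if PySem.List.pyGetD nums (j + 1) 0 - PySem.List.pyGetD nums j 0 = 1 then
          count + 1
        else count) 0 = cnt nums i := by
  rw [PySem.List.foldl_ite_add_one (fun j =>
    PySem.List.pyGetD nums (j + 1) 0 - PySem.List.pyGetD nums j 0 = 1)]
  simp [cnt]

-- the adjacent-pair list is the image of the index range
lemma zip_eq_map_range (nums : List Int) :
    nums.zip (nums.drop 1) =
      (PySem.List.pyRange 0 ((nums.length : Int) - 1) 1).map
        (fun j => (PySem.List.pyGetD nums j 0, PySem.List.pyGetD nums (j + 1) 0)) := by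
  apply List.ext_getElem
  · simp [PySem.List.length_pyRange_one]
  · intro k h1 h2
    have hk : k < nums.length - 1 := by
      simpa using h1
    have e1 : PySem.List.pyGetD nums (k : Int) 0 = nums[k]'(by omega) := by
      rw [PySem.List.pyGetD_eq_getElem nums 0 (by omega) (by omega)]
      simp
    have e2 : PySem.List.pyGetD nums ((k : Int) + 1) 0 = nums[k + 1]'(by omega) := by
      have hcast : ((k : Int) + 1) = ((k + 1 : Nat) : Int) := by push_cast; ring
      rw [hcast, PySem.List.pyGetD_eq_getElem nums 0 (by omega) (by omega)]
      simp
    simp only [List.getElem_zip, List.getElem_drop, List.getElem_map,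
      PySem.List.getElem_pyRange_one, zero_add, e1, e2]
    simp [Nat.add_comm]

-- B computes cnt nums 0
lemma alt_eq_cnt (nums : List Int) : lg_alt nums = cnt nums 0 := by
  unfold lg_alt
  rw [PySem.List.foldl_ite_add_one (fun p : Int × Int => p.2 - p.1 = 1)]
  rw [zip_eq_map_range, List.countP_map]
  have hfun : ((fun x : Int × Int => decide (x.2 - x.1 = 1)) ∘
      fun j => (PySem.List.pyGetD nums j 0, PySem.List.pyGetD nums (j + 1) 0)) =
      fun j => decide (PySem.List.pyGetD nums (j + 1) 0 - PySem.List.pyGetD nums j 0 = 1) := by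
    funext j
    simp [Function.comp]
  rw [hfun]
  simp [cnt]

-- ===== VERDICT (by name: the statement is the Claim_ definition above) =====
theorem lg_spec : Claim_equal_lg := by
  intro nums _
  unfold Spec_lg lg
  simp only [inner_eq]
  rcases nums with _ | ⟨a, t⟩
  · simp [lg_alt]
  · set nums := a :: t with hn
    have hlen : (1 : Int) ≤ (nums.length : Int) := by simp [hn]
    rw [PySem.List.pyRange_one_cons (by omega)]
    simp only [List.foldl_cons, zero_add]
    have hmax : max 0 (cnt nums 0) = cnt nums 0 := by
      have := cnt_nonneg nums 0
      omega
    rw [hmax, alt_eq_cnt]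
    have hub : (PySem.List.pyRange 1 (nums.length : Int) 1).foldl
        (fun acc i => max acc (cnt nums i)) (cnt nums 0) ≤ cnt nums 0 := by
      apply foldl_max_le
      · exact le_refl _
      · intro x hx
        have := (PySem.List.mem_pyRange_one).mp hx
        exact cnt_le_cnt_zero nums x (by omega)
    have hlb := (PySem.List.le_foldl_max_int (PySem.List.pyRange 1 (nums.length : Int) 1)
      (cnt nums) (cnt nums 0)).1
    exact le_antisymm hub hlb
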